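-- pv_equiv track=rewrite | github.com/AricSu/aricsu.github.io | scripts/import_legacy_tidb_html.py | escape_mdx_text
-- ===== SOURCE A (Python) =====
-- def escape_mdx_text(markdown: str) -> str:
--     # MDX treats `{...}` as expressions and `<Tag />` as JSX. Legacy content may include
--     # Prometheus examples like `{name="x"}` or placeholder `<metric ...>` that must render as text.
--     out_lines: list[str] = []
--     in_fence = False
--
--     for raw_line in markdown.splitlines():
--         line = raw_line
--         if line.startswith("```"):
--             in_fence = not in_fence
--             out_lines.append(line)
--             continue
--
--         if in_fence:
--             out_lines.append(line)
--             continue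
--
--         parts = line.split("`")
--         for i in range(0, len(parts), 2):
--             parts[i] = (
--                 parts[i]
--                 .replace("{", "&#123;")
--                 .replace("}", "&#125;")
--                 .replace("<", "&lt;")
--                 .replace(">", "&gt;")
--             )
--         out_lines.append("`".join(parts))
--
--     return "\n".join(out_lines)
-- ===== SOURCE B (Python) =====
-- def _escape_line(line: str) -> str:
--     buf: list[str] = []
--     in_code = False
--     for ch in line:
--         if ch == "`":
--             in_code = not in_code
--             buf.append(ch)
--         elif in_code:
--             buf.append(ch)
--         elif ch == "{":
--             buf.append("&#123;")
--         elif ch == "}":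
--             buf.append("&#125;")
--         elif ch == "<":
--             buf.append("&lt;")
--         elif ch == ">":
--             buf.append("&gt;")
--         else:
--             buf.append(ch)
--     return "".join(buf)
--
--
-- def escape_mdx_text(markdown: str) -> str:
--     out_lines: list[str] = []
--     in_fence = False
--     for line in markdown.splitlines():
--         if line.startswith("```"):
--             in_fence = not in_fence
--             out_lines.append(line)
--         elif in_fence:
--             out_lines.append(line)
--         else:
--             out_lines.append(_escape_line(line))
--     return "\n".join(out_lines)
-- ===== Notes on version B (the rewrite author's own statement) =====
-- stated objective: simpler
-- what changed: The split-on-backtick + chained str.replace over even segments + join pipeline is replaced by a single character-by-character scan of each line that flips an in_code flag at every backtick and escapes the MDX-special characters only when outside code.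
import Mathlib
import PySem

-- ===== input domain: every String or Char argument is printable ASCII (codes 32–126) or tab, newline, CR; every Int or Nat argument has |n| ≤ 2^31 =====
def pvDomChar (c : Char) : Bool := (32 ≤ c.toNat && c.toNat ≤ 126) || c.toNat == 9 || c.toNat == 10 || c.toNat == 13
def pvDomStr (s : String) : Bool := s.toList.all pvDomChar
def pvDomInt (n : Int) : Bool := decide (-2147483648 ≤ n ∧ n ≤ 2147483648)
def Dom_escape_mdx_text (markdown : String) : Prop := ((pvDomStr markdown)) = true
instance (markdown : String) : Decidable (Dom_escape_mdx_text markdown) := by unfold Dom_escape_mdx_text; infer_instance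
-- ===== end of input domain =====

-- B replaces A's split-on-backtick + chained replaces on even segments + join per line
-- by a single per-character scan with an in_code flag; objective: simpler (one pass per line).

-- ===== PORT A =====

-- the chained .replace calls on a non-code segment
def pvEscA (cs : List Char) : List Char :=
  PySem.Chars.replace
    (PySem.Chars.replace
      (PySem.Chars.replace
        (PySem.Chars.replace cs "{".toList "&#123;".toList)
        "}".toList "&#125;".toList)
      "<".toList "&lt;".toList)
    ">".toList "&gt;".toList

-- parts = line.split('`'); for i in range(0, len(parts), 2): parts[i] = …; '`'.join(parts)
-- (i from range(0, len(parts), 2) is always a valid nonnegative index, so getD/set are exact here)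
def pvLineA (line : List Char) : List Char :=
  let parts := PySem.Chars.splitOn line "`".toList
  let parts2 := (PySem.List.pyRange 0 parts.length 2).foldl
    (fun ps i => ps.set i.toNat (pvEscA (PySem.List.pyGetD ps i []))) parts
  PySem.Chars.join "`".toList parts2

def escape_mdx_text (markdown : String) : String :=
  String.mk (PySem.Chars.join ['\n']
    ((PySem.Chars.splitlines markdown.toList).foldl
      (fun (st : List (List Char) × Bool) line =>
        if PySem.Chars.startswith line "```".toList then (st.1 ++ [line], !st.2)
        else if st.2 then (st.1 ++ [line], st.2)
        else (st.1 ++ [pvLineA line], st.2)) ([], false)).1)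

-- ===== PORT B =====

-- _escape_line: one pass over the line, flipping in_code at each backtick
def pvLineB (line : List Char) : List Char :=
  (line.foldl
    (fun (st : List Char × Bool) ch =>
      if ch = '`' then (st.1 ++ [ch], !st.2)
      else if st.2 then (st.1 ++ [ch], st.2)
      else if ch = '{' then (st.1 ++ "&#123;".toList, st.2)
      else if ch = '}' then (st.1 ++ "&#125;".toList, st.2)
      else if ch = '<' then (st.1 ++ "&lt;".toList, st.2)
      else if ch = '>' then (st.1 ++ "&gt;".toList, st.2)
      else (st.1 ++ [ch], st.2)) ([], false)).1

def escape_mdx_text_alt (markdown : String) : String :=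
  String.mk (PySem.Chars.join ['\n']
    ((PySem.Chars.splitlines markdown.toList).foldl
      (fun (st : List (List Char) × Bool) line =>
        if PySem.Chars.startswith line "```".toList then (st.1 ++ [line], !st.2)
        else if st.2 then (st.1 ++ [line], st.2)
        else (st.1 ++ [pvLineB line], st.2)) ([], false)).1)

-- ===== PRECONDITION & SPEC =====
def Spec_escape_mdx_text (markdown : String) (out : String) : Prop := out = escape_mdx_text_alt markdown
instance (markdown : String) (out : String) : Decidable (Spec_escape_mdx_text markdown out) := by unfold Spec_escape_mdx_text; infer_instance

-- ===== CLAIM (what is proved, stated in full; the proofs are below) =====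
def Claim_equal_escape_mdx_text : Prop := ∀ (markdown : String), Dom_escape_mdx_text markdown → Spec_escape_mdx_text markdown (escape_mdx_text markdown)

-- ===== LEMMAS AND PROOFS =====

-- single-character replace, structurally
def pvRep (o : Char) (new : List Char) : List Char → List Char
  | [] => []
  | c :: t => (if c = o then new else [c]) ++ pvRep o new t

-- the four replaces chained, over pvRep
def pvEsc' (cs : List Char) : List Char :=
  pvRep '>' "&gt;".toList (pvRep '<' "&lt;".toList
    (pvRep '}' "&#125;".toList (pvRep '{' "&#123;".toList cs)))

-- the per-character escape table of B
def pvEscCh (c : Char) : List Char :=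
  if c = '{' then "&#123;".toList
  else if c = '}' then "&#125;".toList
  else if c = '<' then "&lt;".toList
  else if c = '>' then "&gt;".toList
  else [c]

-- split on '`' as (first segment, later segments)
def pvSplit : List Char → List Char × List (List Char)
  | [] => ([], [])
  | c :: r =>
    let p := pvSplit r
    if c = '`' then ([], p.1 :: p.2) else (c :: p.1, p.2)

-- escape every other segment, starting with b
def pvAlt : Bool → List (List Char) → List (List Char)
  | _, [] => []
  | b, p :: ps => (if b then pvEscA p else p) :: pvAlt (!b) ps

-- B's scan, structurally (inc = in_code)
def pvScan : Bool → List Char → List Char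
  | _, [] => []
  | inc, c :: r =>
    if c = '`' then c :: pvScan (!inc) r
    else if inc then c :: pvScan inc r
    else pvEscCh c ++ pvScan inc r

theorem rep_go (o : Char) (new : List Char) : ∀ (fuel : Nat) (l acc : List Char), l.length ≤ fuel →
    PySem.Chars.replace.go [o] new fuel l acc = acc.reverse ++ pvRep o new l := by
  intro fuel
  induction fuel with
  | zero =>
    intro l acc h
    have : l = [] := by cases l <;> simp_all
    subst this
    simp [PySem.Chars.replace.go, pvRep]
  | succ n ih =>
    intro l acc h
    cases l with
    | nil => simp [PySem.Chars.replace.go, pvRep]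
    | cons c t =>
      by_cases hc : c = o
      · subst hc
        rw [PySem.Chars.replace.go]
        simp only [List.isPrefixOf, Bool.and_true, beq_self_eq_true, if_pos]
        rw [ih _ _ (by simpa using h)]
        simp [pvRep]
      · rw [PySem.Chars.replace.go]
        have hp : ([o].isPrefixOf (c :: t)) = false := by
          simp [List.isPrefixOf]
          exact fun h' => absurd h'.symm hc
        rw [hp]
        simp only [Bool.false_eq_true, if_false]
        rw [ih _ _ (by simpa using h)]
        simp [pvRep, hc]

theorem replace_single (o : Char) (new cs : List Char) :
    PySem.Chars.replace cs [o] new = pvRep o new cs := by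
  rw [PySem.Chars.replace]
  simp only [List.isEmpty_cons, Bool.false_eq_true, if_false]
  exact rep_go o new cs.length cs [] (le_refl _) |>.trans (by simp)

theorem pvEscA_eq (cs : List Char) : pvEscA cs = pvEsc' cs := by
  simp only [pvEscA, pvEsc',
    show "{".toList = ['{'] from rfl, show "}".toList = ['}'] from rfl,
    show "<".toList = ['<'] from rfl, show ">".toList = ['>'] from rfl,
    replace_single]

theorem pvEsc'_cons (c : Char) (cs : List Char) :
    pvEsc' (c :: cs) = pvEscCh c ++ pvEsc' cs := by
  by_cases h1 : c = '{'
  · subst h1; simp [pvEsc', pvEscCh, pvRep]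
  · by_cases h2 : c = '}'
    · subst h2; simp [pvEsc', pvEscCh, pvRep]
    · by_cases h3 : c = '<'
      · subst h3; simp [pvEsc', pvEscCh, pvRep]
      · by_cases h4 : c = '>'
        · subst h4; simp [pvEsc', pvEscCh, pvRep]
        · simp [pvEsc', pvEscCh, pvRep, h1, h2, h3, h4]

theorem pvEscA_cons (c : Char) (cs : List Char) :
    pvEscA (c :: cs) = pvEscCh c ++ pvEscA cs := by
  rw [pvEscA_eq, pvEscA_eq, pvEsc'_cons]

theorem pvEscA_nil : pvEscA [] = [] := rfl

theorem split_go : ∀ (fuel : Nat) (l cur : List Char) (acc : List (List Char)),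
    l.length ≤ fuel →
    PySem.Chars.splitOn.go ['`'] fuel l cur acc =
      acc.reverse ++ (cur.reverse ++ (pvSplit l).1) :: (pvSplit l).2 := by
  intro fuel
  induction fuel with
  | zero =>
    intro l cur acc h
    have : l = [] := by cases l <;> simp_all
    subst this
    simp [PySem.Chars.splitOn.go, pvSplit]
  | succ n ih =>
    intro l cur acc h
    cases l with
    | nil => simp [PySem.Chars.splitOn.go, pvSplit]
    | cons c t =>
      by_cases hc : c = '`'
      · subst hc
        rw [PySem.Chars.splitOn.go]
        simp only [List.isPrefixOf, Bool.and_true, beq_self_eq_true, if_pos]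
        rw [ih _ _ _ (by simpa using h)]
        simp [pvSplit]
      · rw [PySem.Chars.splitOn.go]
        have hp : (['`'].isPrefixOf (c :: t)) = false := by
          simp [List.isPrefixOf]
          exact fun h' => absurd h'.symm hc
        rw [hp]
        simp only [Bool.false_eq_true, if_false]
        rw [ih _ _ _ (by simpa using h)]
        simp [pvSplit, hc]

theorem splitOn_eq (cs : List Char) :
    PySem.Chars.splitOn cs "`".toList = (pvSplit cs).1 :: (pvSplit cs).2 := by
  rw [show "`".toList = ['`'] from rfl, PySem.Chars.splitOn]
  rw [split_go (cs.length + 1) cs [] [] (by omega)]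
  simp

-- pyRange 0 (n+2) 2 splits off its head
theorem r2_cons (n : Int) (hn : 0 ≤ n) :
    PySem.List.pyRange 0 (n + 2) 2 = 0 :: (PySem.List.pyRange 0 n 2).map (fun i => 2 + i) := by
  rw [PySem.List.pyRange_of_pos _ _ (by norm_num), PySem.List.pyRange_of_pos _ _ (by norm_num)]
  rw [if_pos (by omega)]
  have hm : ((n + 2 - 0 + 2 - 1) / 2).toNat
      = (if 0 < n then ((n - 0 + 2 - 1) / 2).toNat else 0) + 1 := by
    split_ifs with h <;> omega
  rw [hm, List.range_succ_eq_map]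
  simp only [List.map_cons, List.map_map]
  refine congrArg₂ _ (by norm_num) (List.map_congr_left ?_)
  intro k _
  simp only [Function.comp]
  push_cast
  ring

theorem r2_nil (a b : Int) (h : b ≤ a) : PySem.List.pyRange a b 2 = [] := by
  rw [PySem.List.pyRange_of_pos _ _ (by norm_num)]
  rw [if_neg (by omega)]
  simp

-- the inner-loop step of port A
def pvStepA (ps : List (List Char)) (i : Int) : List (List Char) :=
  ps.set i.toNat (pvEscA (PySem.List.pyGetD ps i []))

theorem shift_fold : ∀ (l : List Int), (∀ i ∈ l, 0 ≤ i) →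
    ∀ (x y : List Char) (zs : List (List Char)),
    (l.map (fun i => 2 + i)).foldl pvStepA (x :: y :: zs) = x :: y :: l.foldl pvStepA zs := by
  intro l
  induction l with
  | nil => simp
  | cons i t ih =>
    intro hpos x y zs
    have hi : (0 : Int) ≤ i := hpos i (by simp)
    have hstep : pvStepA (x :: y :: zs) (2 + i) = x :: y :: pvStepA zs i := by
      unfold pvStepA
      rw [PySem.List.pyGetD_of_nonneg _ _ (by omega), PySem.List.pyGetD_of_nonneg _ _ hi]
      have ht : (2 + i).toNat = i.toNat + 1 + 1 := by omega
      rw [ht, List.getD_cons_succ, List.getD_cons_succ, List.set_cons_succ, List.set_cons_succ]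
    simp only [List.map_cons, List.foldl_cons, hstep]
    exact ih (fun j hj => hpos j (by simp [hj])) x y (pvStepA zs i)

theorem foldA : ∀ ps : List (List Char),
    (PySem.List.pyRange 0 ps.length 2).foldl pvStepA ps = pvAlt true ps
  | [] => by
    rw [show (([] : List (List Char)).length : Int) = 0 from rfl, r2_nil 0 0 (by omega)]
    simp [pvAlt]
  | [p] => by
    rw [show (([p] : List (List Char)).length : Int) = 1 by simp]
    have : PySem.List.pyRange 0 1 2 = [0] := by
      rw [PySem.List.pyRange_of_pos _ _ (by norm_num)]
      rw [if_pos (by omega)]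
      rw [show ((1 : Int) - 0 + 2 - 1) / 2 = 1 by omega]
      simp
    rw [this]
    simp only [List.foldl_cons, List.foldl_nil]
    unfold pvStepA
    rw [PySem.List.pyGetD_of_nonneg _ _ (by omega)]
    simp [pvAlt]
  | p :: q :: rest => by
    rw [List.length_cons, List.length_cons]
    have hc : ((rest.length + 1 + 1 : Nat) : Int) = (rest.length : Int) + 2 := by push_cast; ring
    rw [hc, r2_cons _ (by positivity)]
    simp only [List.foldl_cons]
    have hstep0 : pvStepA (p :: q :: rest) 0 = pvEscA p :: q :: rest := by
      unfold pvStepA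
      rw [PySem.List.pyGetD_of_nonneg _ _ (by omega)]
      simp
    rw [hstep0, shift_fold _ (fun i hi => ((PySem.List.mem_pyRange_iff_of_pos (by norm_num) i).mp hi).1)]
    rw [foldA rest]
    simp [pvAlt]

theorem inter_cons (sep x y : List Char) (ys : List (List Char)) :
    List.intercalate sep (x :: y :: ys) = x ++ sep ++ List.intercalate sep (y :: ys) := by
  simp [List.intercalate, List.intersperse]

-- a ++-prefix on the head slides out of intercalate
theorem inter_head (sep pre b : List Char) (ts : List (List Char)) :
    List.intercalate sep ((pre ++ b) :: ts) = pre ++ List.intercalate sep (b :: ts) := by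
  cases ts with
  | nil => simp [List.intercalate]
  | cons y ys => rw [inter_cons, inter_cons]; simp

theorem main_line : ∀ (cs : List Char) (inc : Bool),
    List.intercalate ['`'] (pvAlt (!inc) ((pvSplit cs).1 :: (pvSplit cs).2)) = pvScan inc cs := by
  intro cs
  induction cs with
  | nil =>
    intro inc
    cases inc <;> simp [pvSplit, pvAlt, pvScan, List.intercalate, pvEscA_nil]
  | cons c r ih =>
    intro inc
    by_cases hc : c = '`'
    · subst hc
      have h1 : pvSplit ('`' :: r) = ([], (pvSplit r).1 :: (pvSplit r).2) := by
        simp [pvSplit]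
      rw [h1]
      simp only [pvAlt]
      rw [show (if (!inc) = true then pvEscA [] else []) = [] by cases inc <;> simp [pvEscA_nil]]
      rw [inter_cons]
      have hih := ih (!inc)
      simp only [pvAlt] at hih
      rw [hih]
      simp [pvScan]
    · have h1 : pvSplit (c :: r) = (c :: (pvSplit r).1, (pvSplit r).2) := by
        simp [pvSplit, hc]
      rw [h1]
      simp only [pvAlt]
      have hhead : (if (!inc) = true then pvEscA (c :: (pvSplit r).1) else c :: (pvSplit r).1)
          = (if (!inc) = true then pvEscCh c else [c])
            ++ (if (!inc) = true then pvEscA (pvSplit r).1 else (pvSplit r).1) := by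
        cases inc <;> simp [pvEscA_cons]
      rw [hhead, inter_head]
      have hih := ih inc
      simp only [pvAlt] at hih
      rw [hih]
      cases inc <;> simp [pvScan, hc]

theorem foldB : ∀ (cs : List Char) (buf : List Char) (inc : Bool),
    (cs.foldl
      (fun (st : List Char × Bool) ch =>
        if ch = '`' then (st.1 ++ [ch], !st.2)
        else if st.2 then (st.1 ++ [ch], st.2)
        else if ch = '{' then (st.1 ++ "&#123;".toList, st.2)
        else if ch = '}' then (st.1 ++ "&#125;".toList, st.2)
        else if ch = '<' then (st.1 ++ "&lt;".toList, st.2)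
        else if ch = '>' then (st.1 ++ "&gt;".toList, st.2)
        else (st.1 ++ [ch], st.2)) (buf, inc)).1 = buf ++ pvScan inc cs := by
  intro cs
  induction cs with
  | nil => intro buf inc; simp [pvScan]
  | cons c r ih =>
    intro buf inc
    simp only [List.foldl_cons]
    by_cases h0 : c = '`'
    · subst h0
      rw [ih]
      simp [pvScan]
    · rw [if_neg h0]
      by_cases hinc : inc
      · subst hinc
        rw [ih]
        simp [pvScan, h0]
      · simp only [Bool.not_eq_true] at hinc
        subst hinc
        simp only [Bool.false_eq_true, if_false]
        by_cases h1 : c = '{'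
        · subst h1; rw [if_pos rfl, ih]; simp [pvScan, pvEscCh]
        · rw [if_neg h1]
          by_cases h2 : c = '}'
          · subst h2; rw [if_pos rfl, ih]; simp [pvScan, pvEscCh, h0]
          · rw [if_neg h2]
            by_cases h3 : c = '<'
            · subst h3; rw [if_pos rfl, ih]; simp [pvScan, pvEscCh]
            · rw [if_neg h3]
              by_cases h4 : c = '>'
              · subst h4; rw [if_pos rfl, ih]; simp [pvScan, pvEscCh]
              · rw [if_neg h4, ih]
                simp [pvScan, pvEscCh, h0, h1, h2, h3, h4]

theorem line_eq : pvLineA = pvLineB := by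
  funext line
  rw [pvLineB, foldB]
  rw [pvLineA]
  simp only [splitOn_eq]
  rw [show (fun (ps : List (List Char)) (i : Int) =>
        ps.set i.toNat (pvEscA (PySem.List.pyGetD ps i []))) = pvStepA from rfl]
  rw [foldA]
  have := main_line line false
  simpa [PySem.Chars.join] using this

-- ===== VERDICT (by name: the statement is the Claim_ definition above) =====
theorem escape_mdx_text_spec : Claim_equal_escape_mdx_text := by
  intro markdown _
  unfold Spec_escape_mdx_text escape_mdx_text escape_mdx_text_alt
  rw [line_eq]
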